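-- pv_equiv track=rewrite | github.com/gabrieldorosh/QR-Code-Generator | masking.py | penalty_rule3
-- ===== SOURCE A (Python) =====
-- def penalty_rule3(matrix: list[list[int]]) -> int:
--     size = len(matrix)
--     penalty = 0
--     pattern = [1,0,1,1,1,0,1]
--
--     # rows
--     for r in range(size):
--         for c in range(size - 6):
--             if [matrix[r][c+i] for i in range(7)] == pattern:
--                 # Check 4 light modules before
--                 if c >= 4 and all(matrix[r][c-1-i] == 0 for i in range(4)):
--                     penalty += 40
--                 # Check 4 light modules after
--                 if c + 7 <= size - 4 and all(matrix[r][c+7+i] == 0 for i in range(4)):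
--                     penalty += 40
--
--     # columns
--     for c in range(size):
--         for r in range(size - 6):
--             if [matrix[r+i][c] for i in range(7)] == pattern:
--                 if r >= 4 and all(matrix[r-1-i][c] == 0 for i in range(4)):
--                     penalty += 40
--                 if r + 7 <= size - 4 and all(matrix[r+7+i][c] == 0 for i in range(4)):
--                     penalty += 40
--
--     return penalty
-- ===== SOURCE B (Python) =====
-- def penalty_rule3(matrix: list[list[int]]) -> int:
--     size = len(matrix)
--     if size < 11:
--         return 0
--     after = [1, 0, 1, 1, 1, 0, 1, 0, 0, 0, 0]
--     before = after[::-1]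
--     rows = [row[:size] for row in matrix]
--     cols = [[row[c] for row in matrix] for c in range(size)]
--     hits = 0
--     for line in rows + cols:
--         for s in range(size - 10):
--             w = line[s:s + 11]
--             if w == after:
--                 hits += 1
--             if w == before:
--                 hits += 1
--     return hits * 40
-- ===== Notes on version B (the rewrite author's own statement) =====
-- stated objective: simpler
-- what changed: Replaces the 7-cell pattern match plus two guarded 4-zero lookback/lookahead scans by a single comparison of each 11-cell sliding window (a list slice) against the two full target patterns (1011101 0000 and its reverse) over rows and explicitly extracted columns, with an early return 0 when size < 11; the constant-factor speedup comes from one slice+list-compare per window instead of a fresh 7-element list build plus generator-based guard checks per position.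
import Mathlib
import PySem

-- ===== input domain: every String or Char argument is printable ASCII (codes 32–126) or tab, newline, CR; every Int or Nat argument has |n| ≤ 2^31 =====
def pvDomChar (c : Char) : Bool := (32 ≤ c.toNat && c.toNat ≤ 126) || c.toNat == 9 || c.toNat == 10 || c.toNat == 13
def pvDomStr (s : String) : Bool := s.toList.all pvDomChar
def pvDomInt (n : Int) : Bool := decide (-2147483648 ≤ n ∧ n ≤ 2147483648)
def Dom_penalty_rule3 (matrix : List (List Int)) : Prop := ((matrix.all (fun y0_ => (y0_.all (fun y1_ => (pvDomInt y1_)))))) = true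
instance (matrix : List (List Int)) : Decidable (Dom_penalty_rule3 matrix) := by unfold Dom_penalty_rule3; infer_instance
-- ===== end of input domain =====

-- B replaces A's 7-cell pattern match with two guarded 4-zero scans by one comparison of each
-- 11-cell window against the two full target patterns over rows and extracted columns (simpler).

-- ===== PORT A =====
-- pattern = [1,0,1,1,1,0,1]
def pr3_pat : List Int := [1, 0, 1, 1, 1, 0, 1]

-- matrix[r][c] (indices here are always nonnegative; out-of-range = IndexError, excluded by Pre_)
def pyCell (matrix : List (List Int)) (r c : Int) : Int :=
  PySem.List.pyGetD (PySem.List.pyGetD matrix r []) c 0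

-- A's inner loop over one line (the row/column bodies are the same code, abstracted
-- over the cell accessor g: rows use g = matrix[r][·], columns use g = matrix[·][c])
def aLine (size : Int) (g : Int → Int) (pen : Int) : Int :=
  (PySem.List.pyRange 0 (size - 6) 1).foldl (fun pen c =>
    if (PySem.List.pyRange 0 7 1).map (fun i => g (c + i)) = pr3_pat then
      let pen := if 4 ≤ c ∧ (PySem.List.pyRange 0 4 1).all (fun i => g (c - 1 - i) == 0) then pen + 40 else pen
      if c + 7 ≤ size - 4 ∧ (PySem.List.pyRange 0 4 1).all (fun i => g (c + 7 + i) == 0) then pen + 40 else pen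
    else pen) pen

def penalty_rule3 (matrix : List (List Int)) : Int :=
  let size : Int := matrix.length
  -- rows
  let pen := (PySem.List.pyRange 0 size 1).foldl
    (fun pen r => aLine size (fun j => pyCell matrix r j) pen) 0
  -- columns
  (PySem.List.pyRange 0 size 1).foldl
    (fun pen c => aLine size (fun j => pyCell matrix j c) pen) pen

-- ===== PORT B =====
def pr3_after : List Int := [1, 0, 1, 1, 1, 0, 1, 0, 0, 0, 0]
def pr3_before : List Int := pr3_after.reverse

-- B's window scan over one line
def bLine (size : Int) (hits : Int) (line : List Int) : Int :=
  (PySem.List.pyRange 0 (size - 10) 1).foldl (fun hits s =>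
    let w := PySem.List.slice line (some s) (some (s + 11))
    let hits := if w = pr3_after then hits + 1 else hits
    if w = pr3_before then hits + 1 else hits) hits

def penalty_rule3_alt (matrix : List (List Int)) : Int :=
  let size : Int := matrix.length
  if size < 11 then 0
  else
    let rows := matrix.map (fun row => PySem.List.slice row none (some size))
    let cols := (PySem.List.pyRange 0 size 1).map
      (fun c => matrix.map (fun row => PySem.List.pyGetD row c 0))
    ((rows ++ cols).foldl (bLine size) 0) * 40

-- ===== PRECONDITION & SPEC =====
-- Pre_ excludes only matrices on which A raises IndexError: when size ≥ 7 every column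
-- index 0..size-1 of every row is read, so a row shorter than size makes A raise.
def Pre_penalty_rule3 (matrix : List (List Int)) : Prop :=
  matrix.length ≤ 6 ∨ ∀ row ∈ matrix, matrix.length ≤ row.length
instance (matrix : List (List Int)) : Decidable (Pre_penalty_rule3 matrix) := by
  unfold Pre_penalty_rule3; infer_instance

def pvWitness_penalty_rule3 : List (List Int) :=
  [[1,0,1,1,1,0,1,0,0,0,0],[0,0,0,0,0,0,0,0,0,0,0],[0,0,0,0,0,0,0,0,0,0,0],
   [0,0,0,0,0,0,0,0,0,0,0],[0,0,0,0,0,0,0,0,0,0,0],[0,0,0,0,0,0,0,0,0,0,0],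
   [0,0,0,0,0,0,0,0,0,0,0],[0,0,0,0,0,0,0,0,0,0,0],[0,0,0,0,0,0,0,0,0,0,0],
   [0,0,0,0,0,0,0,0,0,0,0],[0,0,0,0,0,0,0,0,0,0,0]]

def Spec_penalty_rule3 (matrix : List (List Int)) (out : Int) : Prop := out = penalty_rule3_alt matrix
instance (matrix : List (List Int)) (out : Int) : Decidable (Spec_penalty_rule3 matrix out) := by
  unfold Spec_penalty_rule3; infer_instance

-- ===== CLAIM (what is proved, stated in full; the proofs are below) =====
def Claim_equal_penalty_rule3 : Prop := ∀ (matrix : List (List Int)), Dom_penalty_rule3 matrix → Pre_penalty_rule3 matrix → Spec_penalty_rule3 matrix (penalty_rule3 matrix)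
-- ===== LEMMAS AND PROOFS =====

-- A's per-c contribution, and B's per-s contribution
def hA (size : Int) (g : Int → Int) (c : Int) : Int :=
  if (PySem.List.pyRange 0 7 1).map (fun i => g (c + i)) = pr3_pat then
    (if 4 ≤ c ∧ (PySem.List.pyRange 0 4 1).all (fun i => g (c - 1 - i) == 0) then 40 else 0)
    + (if c + 7 ≤ size - 4 ∧ (PySem.List.pyRange 0 4 1).all (fun i => g (c + 7 + i) == 0) then 40 else 0)
  else 0

def hB (line : List Int) (s : Int) : Int :=
  (if PySem.List.slice line (some s) (some (s + 11)) = pr3_after then 1 else 0)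
  + (if PySem.List.slice line (some s) (some (s + 11)) = pr3_before then 1 else 0)

def sigA (size : Int) (g : Int → Int) : Int := ((PySem.List.pyRange 0 (size - 6) 1).map (hA size g)).sum
def sigB (size : Int) (line : List Int) : Int := ((PySem.List.pyRange 0 (size - 10) 1).map (hB line)).sum

theorem aLine_eq (size : Int) (g : Int → Int) (pen : Int) :
    aLine size g pen = pen + sigA size g := by
  unfold aLine sigA
  rw [show (fun (pen c : Int) =>
      if (PySem.List.pyRange 0 7 1).map (fun i => g (c + i)) = pr3_pat then
        let pen := if 4 ≤ c ∧ (PySem.List.pyRange 0 4 1).all (fun i => g (c - 1 - i) == 0) then pen + 40 else pen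
        if c + 7 ≤ size - 4 ∧ (PySem.List.pyRange 0 4 1).all (fun i => g (c + 7 + i) == 0) then pen + 40 else pen
      else pen) = (fun pen c => pen + hA size g c) from by
    funext pen c
    simp only [hA]
    split_ifs <;> ring]
  exact PySem.List.foldl_add _ _ _

theorem bLine_eq (size : Int) (hits : Int) (line : List Int) :
    bLine size hits line = hits + sigB size line := by
  unfold bLine sigB
  rw [show (fun (hits s : Int) =>
      let w := PySem.List.slice line (some s) (some (s + 11))
      let hits := if w = pr3_after then hits + 1 else hits
      if w = pr3_before then hits + 1 else hits) = (fun hits s => hits + hB line s) from by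
    funext hits s
    simp only [hB]
    split_ifs <;> ring]
  exact PySem.List.foldl_add _ _ _

theorem sigA_zero (size : Int) (g : Int → Int) (h : size ≤ 10) : sigA size g = 0 := by
  unfold sigA
  apply List.sum_eq_zero
  intro x hx
  simp only [List.mem_map] at hx
  obtain ⟨c, hc, rfl⟩ := hx
  rw [PySem.List.mem_pyRange_one] at hc
  simp only [hA]
  split_ifs with h1 h2 h3 h3 <;> first | rfl | omega

theorem take_eleven (l : List Int) (h : 11 ≤ l.length) :
    l.take 11 = [l.getD 0 0, l.getD 1 0, l.getD 2 0, l.getD 3 0, l.getD 4 0, l.getD 5 0,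
                 l.getD 6 0, l.getD 7 0, l.getD 8 0, l.getD 9 0, l.getD 10 0] := by
  rcases l with _|⟨a0,_|⟨a1,_|⟨a2,_|⟨a3,_|⟨a4,_|⟨a5,_|⟨a6,_|⟨a7,_|⟨a8,_|⟨a9,_|⟨a10,t⟩⟩⟩⟩⟩⟩⟩⟩⟩⟩⟩ <;> simp_all

theorem window_eq (line : List Int) (s : Nat) (h : s + 11 ≤ line.length) :
    PySem.List.slice line (some (s : Int)) (some ((s : Int) + 11)) =
      [line.getD s 0, line.getD (s+1) 0, line.getD (s+2) 0, line.getD (s+3) 0, line.getD (s+4) 0,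
       line.getD (s+5) 0, line.getD (s+6) 0, line.getD (s+7) 0, line.getD (s+8) 0,
       line.getD (s+9) 0, line.getD (s+10) 0] := by
  rw [PySem.List.slice_toNat]
  have h1 : ((s : Int) + 11).toNat - (s : Int).toNat = 11 := by omega
  have h2 : (s : Int).toNat = s := by omega
  rw [h1, h2, take_eleven _ (by simp; omega)]
  simp [List.getD, List.getElem?_drop]
  all_goals omega


-- list-sum over a range as a Finset sum
theorem range_map_sum (n : Nat) (f : Nat → Int) :
    ((List.range n).map f).sum = ∑ i ∈ Finset.range n, f i := by
  induction n with
  | zero => simp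
  | succ m ih =>
    rw [List.range_succ, Finset.sum_range_succ, List.map_append, List.sum_append, ih]; simp

theorem hA_split (size : Int) (g : Int → Int) (c : Int) :
    hA size g c =
      (if ((PySem.List.pyRange 0 7 1).map (fun i => g (c + i)) = pr3_pat
            ∧ 4 ≤ c ∧ (PySem.List.pyRange 0 4 1).all (fun i => g (c - 1 - i) == 0)) then 40 else 0)
      + (if ((PySem.List.pyRange 0 7 1).map (fun i => g (c + i)) = pr3_pat
            ∧ c + 7 ≤ size - 4 ∧ (PySem.List.pyRange 0 4 1).all (fun i => g (c + 7 + i) == 0)) then 40 else 0) := by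
  by_cases h1 : (PySem.List.pyRange 0 7 1).map (fun i => g (c + i)) = pr3_pat <;>
    simp [hA, h1]

theorem pat_iff (N : Nat) (line : List Int) (g : Int → Int)
    (hg : ∀ j : Nat, j < N → g (j : Int) = line.getD j 0) (c : Nat) (hc : c + 6 < N) :
    ((PySem.List.pyRange 0 7 1).map (fun i => g ((c : Int) + i)) = pr3_pat) ↔
      (line.getD c 0 = 1 ∧ line.getD (c+1) 0 = 0 ∧ line.getD (c+2) 0 = 1 ∧ line.getD (c+3) 0 = 1
        ∧ line.getD (c+4) 0 = 1 ∧ line.getD (c+5) 0 = 0 ∧ line.getD (c+6) 0 = 1) := by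
  rw [show (PySem.List.pyRange 0 7 1) = [0,1,2,3,4,5,6] from by decide]
  simp only [List.map_cons, List.map_nil]
  rw [show (c : Int) + 0 = ((c : Nat) : Int) from by omega,
      show (c : Int) + 1 = ((c + 1 : Nat) : Int) from by omega,
      show (c : Int) + 2 = ((c + 2 : Nat) : Int) from by omega,
      show (c : Int) + 3 = ((c + 3 : Nat) : Int) from by omega,
      show (c : Int) + 4 = ((c + 4 : Nat) : Int) from by omega,
      show (c : Int) + 5 = ((c + 5 : Nat) : Int) from by omega,
      show (c : Int) + 6 = ((c + 6 : Nat) : Int) from by omega,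
      hg c (by omega), hg (c+1) (by omega), hg (c+2) (by omega), hg (c+3) (by omega),
      hg (c+4) (by omega), hg (c+5) (by omega), hg (c+6) (by omega)]
  simp [pr3_pat]

theorem zb_iff (N : Nat) (line : List Int) (g : Int → Int)
    (hg : ∀ j : Nat, j < N → g (j : Int) = line.getD j 0) (c : Nat) (h4 : 4 ≤ c) (hc : c < N) :
    (((PySem.List.pyRange 0 4 1).all (fun i => g ((c : Int) - 1 - i) == 0)) = true) ↔
      (line.getD (c-1) 0 = 0 ∧ line.getD (c-2) 0 = 0 ∧ line.getD (c-3) 0 = 0 ∧ line.getD (c-4) 0 = 0) := by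
  rw [show (PySem.List.pyRange 0 4 1) = [0,1,2,3] from by decide]
  simp only [List.all_cons, List.all_nil, Bool.and_true, Bool.and_eq_true, beq_iff_eq]
  rw [show (c : Int) - 1 - 0 = ((c - 1 : Nat) : Int) from by omega,
      show (c : Int) - 1 - 1 = ((c - 2 : Nat) : Int) from by omega,
      show (c : Int) - 1 - 2 = ((c - 3 : Nat) : Int) from by omega,
      show (c : Int) - 1 - 3 = ((c - 4 : Nat) : Int) from by omega,
      hg (c-1) (by omega), hg (c-2) (by omega), hg (c-3) (by omega), hg (c-4) (by omega)]

theorem za_iff (N : Nat) (line : List Int) (g : Int → Int)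
    (hg : ∀ j : Nat, j < N → g (j : Int) = line.getD j 0) (c : Nat) (hc : c + 10 < N) :
    (((PySem.List.pyRange 0 4 1).all (fun i => g ((c : Int) + 7 + i) == 0)) = true) ↔
      (line.getD (c+7) 0 = 0 ∧ line.getD (c+8) 0 = 0 ∧ line.getD (c+9) 0 = 0 ∧ line.getD (c+10) 0 = 0) := by
  rw [show (PySem.List.pyRange 0 4 1) = [0,1,2,3] from by decide]
  simp only [List.all_cons, List.all_nil, Bool.and_true, Bool.and_eq_true, beq_iff_eq]
  rw [show (c : Int) + 7 + 0 = ((c + 7 : Nat) : Int) from by omega,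
      show (c : Int) + 7 + 1 = ((c + 8 : Nat) : Int) from by omega,
      show (c : Int) + 7 + 2 = ((c + 9 : Nat) : Int) from by omega,
      show (c : Int) + 7 + 3 = ((c + 10 : Nat) : Int) from by omega,
      hg (c+7) (by omega), hg (c+8) (by omega), hg (c+9) (by omega), hg (c+10) (by omega)]

theorem after_iff (N : Nat) (line : List Int) (hlen : line.length = N) (s : Nat) (hs : s + 11 ≤ N) :
    (PySem.List.slice line (some (s : Int)) (some ((s : Int) + 11)) = pr3_after) ↔
      (line.getD s 0 = 1 ∧ line.getD (s+1) 0 = 0 ∧ line.getD (s+2) 0 = 1 ∧ line.getD (s+3) 0 = 1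
        ∧ line.getD (s+4) 0 = 1 ∧ line.getD (s+5) 0 = 0 ∧ line.getD (s+6) 0 = 1
        ∧ line.getD (s+7) 0 = 0 ∧ line.getD (s+8) 0 = 0 ∧ line.getD (s+9) 0 = 0
        ∧ line.getD (s+10) 0 = 0) := by
  rw [window_eq line s (by omega)]
  simp [pr3_after]

theorem before_iff (N : Nat) (line : List Int) (hlen : line.length = N) (s : Nat) (hs : s + 11 ≤ N) :
    (PySem.List.slice line (some (s : Int)) (some ((s : Int) + 11)) = pr3_before) ↔
      (line.getD s 0 = 0 ∧ line.getD (s+1) 0 = 0 ∧ line.getD (s+2) 0 = 0 ∧ line.getD (s+3) 0 = 0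
        ∧ line.getD (s+4) 0 = 1 ∧ line.getD (s+5) 0 = 0 ∧ line.getD (s+6) 0 = 1
        ∧ line.getD (s+7) 0 = 1 ∧ line.getD (s+8) 0 = 1 ∧ line.getD (s+9) 0 = 0
        ∧ line.getD (s+10) 0 = 1) := by
  rw [window_eq line s (by omega),
      show pr3_before = [0,0,0,0,1,0,1,1,1,0,1] from by decide]
  simp

theorem line_main (N : Nat) (hN : 11 ≤ N) (line : List Int) (hlen : line.length = N)
    (g : Int → Int) (hg : ∀ j : Nat, j < N → g (j : Int) = line.getD j 0) :
    sigA (N : Int) g = 40 * sigB (N : Int) line := by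
  -- turn both sides into Finset.range sums over Nat indices
  unfold sigA sigB
  rw [PySem.List.pyRange_one, PySem.List.pyRange_one,
      show ((N : Int) - 6 - 0).toNat = N - 6 from by omega,
      show ((N : Int) - 10 - 0).toNat = N - 10 from by omega,
      ← List.comp_map, ← List.comp_map, range_map_sum, range_map_sum]
  simp only [Function.comp, zero_add]
  have hsplit : (∑ k ∈ Finset.range (N - 6), hA (N : Int) g (k : Int))
      = (∑ k ∈ Finset.range (N - 6),
          (if ((PySem.List.pyRange 0 7 1).map (fun i => g ((k:Int) + i)) = pr3_pat
              ∧ 4 ≤ (k:Int)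
              ∧ (PySem.List.pyRange 0 4 1).all (fun i => g ((k:Int) - 1 - i) == 0)) then (40:Int) else 0))
        + (∑ k ∈ Finset.range (N - 6),
          (if ((PySem.List.pyRange 0 7 1).map (fun i => g ((k:Int) + i)) = pr3_pat
              ∧ (k:Int) + 7 ≤ (N:Int) - 4
              ∧ (PySem.List.pyRange 0 4 1).all (fun i => g ((k:Int) + 7 + i) == 0)) then (40:Int) else 0)) := by
    rw [← Finset.sum_add_distrib]
    exact Finset.sum_congr rfl (fun k _ => hA_split (N : Int) g (k : Int))
  have hBsplit : (∑ s ∈ Finset.range (N - 10), hB line (s : Int))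
      = (∑ s ∈ Finset.range (N - 10),
          (if PySem.List.slice line (some (s:Int)) (some ((s:Int) + 11)) = pr3_after then (1:Int) else 0))
        + (∑ s ∈ Finset.range (N - 10),
          (if PySem.List.slice line (some (s:Int)) (some ((s:Int) + 11)) = pr3_before then (1:Int) else 0)) := by
    rw [← Finset.sum_add_distrib]
    exact Finset.sum_congr rfl (fun s _ => rfl)
  have hafter :
      (∑ k ∈ Finset.range (N - 6),
        if ((PySem.List.pyRange 0 7 1).map (fun i => g ((k:Int) + i)) = pr3_pat
            ∧ (k:Int) + 7 ≤ (N:Int) - 4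
            ∧ (PySem.List.pyRange 0 4 1).all (fun i => g ((k:Int) + 7 + i) == 0)) then (40:Int) else 0)
      = 40 * ∑ s ∈ Finset.range (N - 10),
          (if PySem.List.slice line (some (s:Int)) (some ((s:Int) + 11)) = pr3_after then (1:Int) else 0) := by
    have hzero : ∀ k ∈ Finset.range (N - 6), k ∉ Finset.range (N - 10) →
        (if ((PySem.List.pyRange 0 7 1).map (fun i => g ((k:Int) + i)) = pr3_pat
            ∧ (k:Int) + 7 ≤ (N:Int) - 4
            ∧ (PySem.List.pyRange 0 4 1).all (fun i => g ((k:Int) + 7 + i) == 0)) then (40:Int) else 0) = 0 := by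
      intro k hk hk2
      simp only [Finset.mem_range] at hk hk2
      rw [if_neg]
      rintro ⟨-, h7, -⟩
      omega
    have hsub : Finset.range (N - 10) ⊆ Finset.range (N - 6) := by
      intro x hx
      simp only [Finset.mem_range] at hx ⊢
      omega
    rw [← Finset.sum_subset hsub hzero, Finset.mul_sum]
    apply Finset.sum_congr rfl
    intro s hs
    simp only [Finset.mem_range] at hs
    simp only [pat_iff N line g hg s (by omega), za_iff N line g hg s (by omega),
        after_iff N line hlen s (by omega)]
    have h7 : ((s:Int) + 7 ≤ (N:Int) - 4) := by omega
    split_ifs with h1 h2 h2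
    · ring
    · exfalso
      apply h2
      obtain ⟨⟨p0, p1, p2, p3, p4, p5, p6⟩, -, z7, z8, z9, z10⟩ := h1
      exact ⟨p0, p1, p2, p3, p4, p5, p6, z7, z8, z9, z10⟩
    · exfalso
      apply h1
      obtain ⟨p0, p1, p2, p3, p4, p5, p6, z7, z8, z9, z10⟩ := h2
      exact ⟨⟨p0, p1, p2, p3, p4, p5, p6⟩, h7, z7, z8, z9, z10⟩
    · ring
  have hbefore :
      (∑ k ∈ Finset.range (N - 6),
        if ((PySem.List.pyRange 0 7 1).map (fun i => g ((k:Int) + i)) = pr3_pat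
            ∧ 4 ≤ (k:Int)
            ∧ (PySem.List.pyRange 0 4 1).all (fun i => g ((k:Int) - 1 - i) == 0)) then (40:Int) else 0)
      = 40 * ∑ s ∈ Finset.range (N - 10),
          (if PySem.List.slice line (some (s:Int)) (some ((s:Int) + 11)) = pr3_before then (1:Int) else 0) := by
    have hzero : ∀ k ∈ Finset.Ico 0 (N - 6), k ∉ Finset.Ico 4 (N - 6) →
        (if ((PySem.List.pyRange 0 7 1).map (fun i => g ((k:Int) + i)) = pr3_pat
            ∧ 4 ≤ (k:Int)
            ∧ (PySem.List.pyRange 0 4 1).all (fun i => g ((k:Int) - 1 - i) == 0)) then (40:Int) else 0) = 0 := by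
      intro k hk hk2
      simp only [Finset.mem_Ico] at hk hk2
      rw [if_neg]
      rintro ⟨-, h4, -⟩
      omega
    rw [Finset.range_eq_Ico,
        ← Finset.sum_subset (by apply Finset.Ico_subset_Ico <;> omega :
            Finset.Ico 4 (N - 6) ⊆ Finset.Ico 0 (N - 6)) hzero,
        Finset.sum_Ico_eq_sum_range,
        show N - 6 - 4 = N - 10 from by omega,
        Finset.mul_sum, ← Finset.range_eq_Ico]
    apply Finset.sum_congr rfl
    intro i hi
    simp only [Finset.mem_range] at hi
    simp only [pat_iff N line g hg (4 + i) (by omega), zb_iff N line g hg (4 + i) (by omega) (by omega),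
        before_iff N line hlen i (by omega)]
    simp only [show 4 + i = i + 4 from by omega]
    have h4 : (4:Int) ≤ ((i + 4 : Nat) : Int) := by omega
    split_ifs with h1 h2 h2
    · ring
    · exfalso
      apply h2
      obtain ⟨⟨q4, q5, q6, q7, q8, q9, q10⟩, -, b3, b2, b1, b0⟩ := h1
      exact ⟨b0, b1, b2, b3, q4, q5, q6, q7, q8, q9, q10⟩
    · exfalso
      apply h1
      obtain ⟨z0, z1, z2, z3, q4, q5, q6, q7, q8, q9, q10⟩ := h2
      exact ⟨⟨q4, q5, q6, q7, q8, q9, q10⟩, h4, z3, z2, z1, z0⟩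
    · ring
  rw [hsplit, hBsplit, mul_add, hafter, hbefore]
  ring

theorem range_map_getD {α : Type} (xs : List α) (d : α) :
    (List.range xs.length).map (fun k => xs.getD k d) = xs := by
  apply List.ext_getElem
  · simp
  · intro i h1 h2
    simp only [List.getElem_map, List.getElem_range, List.getD]
    rw [List.getElem?_eq_getElem h2]
    rfl

theorem map_eq_map_range {α β : Type} (xs : List α) (d : α) (F : α → β) :
    xs.map F = (List.range xs.length).map (fun k => F (xs.getD k d)) := by
  conv_lhs => rw [← range_map_getD xs d]
  rw [List.map_map]
  rfl

theorem sum_lines_rows (matrix : List (List Int)) (hall : ∀ row ∈ matrix, matrix.length ≤ row.length)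
    (hN : 11 ≤ matrix.length) :
    ((PySem.List.pyRange 0 (matrix.length : Int) 1).foldl
        (fun pen r => aLine (matrix.length : Int) (fun j => pyCell matrix r j) pen) 0)
      = 40 * ((matrix.map (fun row => PySem.List.slice row none (some (matrix.length : Int)))).map
          (sigB (matrix.length : Int))).sum := by
  rw [show (fun (pen r : Int) => aLine (matrix.length : Int) (fun j => pyCell matrix r j) pen)
        = (fun pen r => pen + sigA (matrix.length : Int) (fun j => pyCell matrix r j)) from by
      funext pen r; exact aLine_eq _ _ _,
    PySem.List.foldl_add, PySem.List.pyRange_one,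
    show ((matrix.length : Int) - 0).toNat = matrix.length from by omega,
    ← List.comp_map, List.map_map]
  simp only [Function.comp_def, zero_add]
  rw [map_eq_map_range matrix [] (fun row => sigB (matrix.length : Int) (PySem.List.slice row none (some (matrix.length : Int)))),
    range_map_sum, range_map_sum, Finset.mul_sum]
  apply Finset.sum_congr rfl
  intro k hk
  simp only [Finset.mem_range] at hk
  have hrowmem : matrix.getD k [] ∈ matrix := by
    rw [List.getD_eq_getElem matrix [] hk]
    exact List.getElem_mem hk
  have hrowlen : matrix.length ≤ (matrix.getD k []).length := hall _ hrowmem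
  rw [PySem.List.slice_to]
  apply line_main matrix.length hN _ (by rw [List.length_take]; omega)
  · intro j hj
    simp only [pyCell]
    rw [PySem.List.pyGetD_natCast, PySem.List.pyGetD_natCast,
        show ((matrix.length : Int)).toNat = matrix.length from by omega]
    simp only [List.getD, List.getElem?_take, hj, if_pos]
  · omega

theorem sum_lines_cols (matrix : List (List Int)) (_hall : ∀ row ∈ matrix, matrix.length ≤ row.length)
    (hN : 11 ≤ matrix.length) (pen0 : Int) :
    ((PySem.List.pyRange 0 (matrix.length : Int) 1).foldl
        (fun pen c => aLine (matrix.length : Int) (fun j => pyCell matrix j c) pen) pen0)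
      = pen0 + 40 * (((PySem.List.pyRange 0 (matrix.length : Int) 1).map
          (fun c => matrix.map (fun row => PySem.List.pyGetD row c 0))).map
            (sigB (matrix.length : Int))).sum := by
  rw [show (fun (pen c : Int) => aLine (matrix.length : Int) (fun j => pyCell matrix j c) pen)
        = (fun pen c => pen + sigA (matrix.length : Int) (fun j => pyCell matrix j c)) from by
      funext pen c; exact aLine_eq _ _ _,
    PySem.List.foldl_add, PySem.List.pyRange_one,
    show ((matrix.length : Int) - 0).toNat = matrix.length from by omega,
    ← List.comp_map, ← List.comp_map, List.map_map]
  simp only [Function.comp_def, zero_add]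
  congr 1
  rw [range_map_sum, range_map_sum, Finset.mul_sum]
  apply Finset.sum_congr rfl
  intro c hc
  simp only [Finset.mem_range] at hc
  apply line_main matrix.length hN _ (by simp)
  intro j hj
  simp only [pyCell]
  rw [PySem.List.pyGetD_natCast, PySem.List.pyGetD_natCast, List.getD_eq_getElem matrix [] hj]
  simp only [List.getD, List.getElem?_map]
  rw [List.getElem?_eq_getElem hj]
  simp only [Option.map_some, Option.getD_some, PySem.List.pyGetD_natCast]
  rfl

theorem penalty_rule3_spec : Claim_equal_penalty_rule3 := by
  intro matrix _ hpre
  unfold Spec_penalty_rule3 penalty_rule3 penalty_rule3_alt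
  by_cases hsz : (matrix.length : Int) < 11
  · -- size < 11: B returns 0, and every per-line contribution of A is 0
    rw [if_pos hsz]
    have hz : ∀ g : Int → Int, aLine (matrix.length : Int) g = fun pen => pen + 0 := by
      intro g
      funext pen
      rw [aLine_eq, sigA_zero _ _ (by omega)]
    have step : ∀ (l : List Int) (f : Int → Int → Int) (init : Int),
        (∀ pen x, f pen x = pen) → l.foldl f init = init := by
      intro l f init hf
      induction l generalizing init with
      | nil => rfl
      | cons a t ih => rw [List.foldl_cons, hf, ih]
    rw [step _ _ _ (fun pen c => by rw [show aLine (matrix.length : Int) (fun j => pyCell matrix j c) pen = pen + 0 from by rw [hz]]; ring),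
        step _ _ _ (fun pen r => by rw [show aLine (matrix.length : Int) (fun j => pyCell matrix r j) pen = pen + 0 from by rw [hz]]; ring)]
  · rw [if_neg hsz]
    dsimp only
    have hN : 11 ≤ matrix.length := by omega
    have hall : ∀ row ∈ matrix, matrix.length ≤ row.length := by
      rcases hpre with h6 | h
      · omega
      · exact h
    rw [sum_lines_cols matrix hall hN, sum_lines_rows matrix hall hN]
    have hb : bLine (matrix.length : Int) = fun hits line => hits + sigB (matrix.length : Int) line := by
      funext hits line
      exact bLine_eq _ _ _
    rw [hb]
    rw [PySem.List.foldl_add]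
    rw [List.map_append]
    rw [List.sum_append]
    ring
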